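-- pv_equiv track=rewrite | github.com/alfmel/rsmtpd | rsmtpd/validators/domain/dns.py | _find_best_fqdn
-- ===== SOURCE A (Python) =====
-- from typing import List, Union
--
-- def _find_best_fqdn(domains: List[str], domain: str) -> Union[str, None]:
--     if not len(domains):
--         return None
--
--     for d in domains:
--         if d.lower() == domain.lower():
--             return d.lower()
--
--     level_matches = [{"domain": d.lower(), "match": __domain_level_matches(domain.lower(), d.lower())} for d in domains]
--     sorted_level_matches = sorted(level_matches, key=lambda e: e["match"])
--     sorted_level_matches.reverse()
--
--     return sorted_level_matches[0]["domain"]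
--
-- def __domain_level_matches(domain1: str, domain2: str) -> int:
--     domain1_parts = domain1.split(".")
--     domain2_parts = domain2.split(".")
--
--     domain1_parts.reverse()
--     domain2_parts.reverse()
--
--     if len(domain1_parts) > len(domain2_parts):
--         long_domain = domain1_parts
--         short_domain = domain2_parts
--     else:
--         long_domain = domain2_parts
--         short_domain = domain1_parts
--
--     for i in range(0, len(short_domain)):
--         if short_domain[i] != long_domain[i]:
--             return i
--
--     return len(short_domain)
-- ===== SOURCE B (Python) =====
-- from typing import List, Union
--
-- def _find_best_fqdn(domains: List[str], domain: str) -> Union[str, None]: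
--     target = domain.lower()
--     best = None
--     best_match = -1
--     for d in domains:
--         dl = d.lower()
--         if dl == target:
--             return target
--         m = _level_matches(target, dl)
--         if m >= best_match:
--             best, best_match = dl, m
--     return best
--
-- def _level_matches(d1: str, d2: str) -> int:
--     i = 0
--     for a, b in zip(d1.split(".")[::-1], d2.split(".")[::-1]):
--         if a != b:
--             break
--         i += 1
--     return i
-- ===== Notes on version B (the rewrite author's own statement) =====
-- stated objective: faster
-- what changed: B replaces A's build-a-dict-list / stable-sort / in-place-reverse / index-0 pipeline with a single left-to-right scan that keeps the running best (domain, match) pair, updating on >= so later ties win exactly as A's stable sort + reverse does, with the same early return on an exact case-insensitive match.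
import Mathlib
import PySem

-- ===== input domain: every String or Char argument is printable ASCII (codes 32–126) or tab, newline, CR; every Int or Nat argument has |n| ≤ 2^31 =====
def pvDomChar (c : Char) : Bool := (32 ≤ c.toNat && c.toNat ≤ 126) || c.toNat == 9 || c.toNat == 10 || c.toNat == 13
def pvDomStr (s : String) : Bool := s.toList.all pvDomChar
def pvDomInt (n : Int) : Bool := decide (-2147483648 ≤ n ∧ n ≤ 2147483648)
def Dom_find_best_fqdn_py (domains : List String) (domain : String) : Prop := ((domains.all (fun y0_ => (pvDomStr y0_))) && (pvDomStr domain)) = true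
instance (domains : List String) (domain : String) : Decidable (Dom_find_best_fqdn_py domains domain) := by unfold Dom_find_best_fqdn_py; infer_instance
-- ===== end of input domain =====

-- B replaces A's build-list / stable-sort / reverse / index pipeline by a single left-to-right
-- scan keeping the running best match (ties broken towards later elements), O(n·L) vs O(n log n·L).

-- ===== PORT A =====
-- s.split(".")  (sep ≠ "", so Python never raises; split? is none only for sep = "")
def pySplitDot (s : String) : List String := (PySem.Str.split? s ".").getD []

-- the 'for i in range(0, len(short_domain))' loop of __domain_level_matches
def dlmLoop (sh lg : List String) (i : Nat) : Int :=
  if i < sh.length then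
    if sh.getD i "" ≠ lg.getD i "" then (i : Int) else dlmLoop sh lg (i + 1)
  else (sh.length : Int)
termination_by sh.length - i

-- __domain_level_matches
def domainLevelMatches (domain1 domain2 : String) : Int :=
  let p1 := (pySplitDot domain1).reverse
  let p2 := (pySplitDot domain2).reverse
  if p1.length > p2.length then dlmLoop p2 p1 0 else dlmLoop p1 p2 0

-- the first 'for d in domains' loop (exact case-insensitive match)
def findExactLoop : List String → String → Option String
  | [], _ => none
  | d :: rest, domain =>
    if PySem.Str.lower d = PySem.Str.lower domain then some (PySem.Str.lower d)
    else findExactLoop rest domain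

def find_best_fqdn_py (domains : List String) (domain : String) : Option String :=
  if domains.length = 0 then none
  else
    match findExactLoop domains domain with
    | some r => some r
    | none =>
      let lm := domains.map (fun d =>
        (PySem.Str.lower d, domainLevelMatches (PySem.Str.lower domain) (PySem.Str.lower d)))
      let slm := (PySem.List.sorted lm (fun e => e.2) false).reverse
      slm.head?.map (fun e => e.1)

-- ===== PORT B =====
-- the 'for a, b in zip(...)' counting loop of _level_matches
def lmAlt : List String → List String → Int
  | a :: t1, b :: t2 => if a ≠ b then 0 else 1 + lmAlt t1 t2
  | _, _ => 0

def levelMatchesAlt (d1 d2 : String) : Int :=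
  lmAlt ((pySplitDot d1).reverse) ((pySplitDot d2).reverse)

-- B's single scan: best / best_match accumulator, early return on exact match
def bLoop (target : String) : List String → Option String → Int → Option String
  | [], best, _ => best
  | d :: rest, best, bm =>
    let dl := PySem.Str.lower d
    if dl = target then some target
    else
      let m := levelMatchesAlt target dl
      if m ≥ bm then bLoop target rest (some dl) m else bLoop target rest best bm

def find_best_fqdn_py_alt (domains : List String) (domain : String) : Option String :=
  bLoop (PySem.Str.lower domain) domains none (-1)

-- ===== PRECONDITION & SPEC =====
def Spec_find_best_fqdn_py (domains : List String) (domain : String) (out : Option String) : Prop := out = find_best_fqdn_py_alt domains domain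
instance (domains : List String) (domain : String) (out : Option String) : Decidable (Spec_find_best_fqdn_py domains domain out) := by unfold Spec_find_best_fqdn_py; infer_instance

-- ===== CLAIM (what is proved, stated in full; the proofs are below) =====
def Claim_equal_find_best_fqdn_py : Prop := ∀ (domains : List String) (domain : String), Dom_find_best_fqdn_py domains domain → Spec_find_best_fqdn_py domains domain (find_best_fqdn_py domains domain)

-- ===== LEMMAS AND PROOFS =====

theorem lmAlt_nonneg (xs ys : List String) : 0 ≤ lmAlt xs ys := by
  induction xs generalizing ys with
  | nil => simp [lmAlt]
  | cons a t ih =>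
    cases ys with
    | nil => simp [lmAlt]
    | cons b u =>
      by_cases h : a = b
      · have := ih u; simp [lmAlt, h]; omega
      · simp [lmAlt, h]

theorem lmAlt_comm (xs ys : List String) : lmAlt xs ys = lmAlt ys xs := by
  induction xs generalizing ys with
  | nil => cases ys <;> simp [lmAlt]
  | cons a t ih =>
    cases ys with
    | nil => simp [lmAlt]
    | cons b u =>
      by_cases h : a = b
      · simp [lmAlt, h, ih u]
      · simp [lmAlt, h, Ne.symm h]

theorem dlm_eq (sh lg : List String) (i : Nat) (hle : sh.length ≤ lg.length)
    (hi : i ≤ sh.length) :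
    dlmLoop sh lg i = (i : Int) + lmAlt (sh.drop i) (lg.drop i) := by
  rw [dlmLoop]
  by_cases h : i < sh.length
  · have hlg : i < lg.length := lt_of_lt_of_le h hle
    rw [List.drop_eq_getElem_cons h, List.drop_eq_getElem_cons hlg]
    simp only [h, if_pos]
    by_cases hne : sh.getD i "" ≠ lg.getD i ""
    · rw [if_pos hne]
      have : sh[i] ≠ lg[i] := by
        rwa [List.getD_eq_getElem _ _ h, List.getD_eq_getElem _ _ hlg] at hne
      simp [lmAlt, this]
    · rw [if_neg hne]
      push Not at hne
      have heq : sh[i] = lg[i] := by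
        rwa [List.getD_eq_getElem _ _ h, List.getD_eq_getElem _ _ hlg] at hne
      rw [dlm_eq sh lg (i + 1) hle (by omega)]
      simp [lmAlt, heq]
      ring
  · rw [if_neg h]
    have : i = sh.length := by omega
    subst this
    simp [lmAlt, List.drop_length]
termination_by sh.length - i

theorem helper_eq (d1 d2 : String) : domainLevelMatches d1 d2 = levelMatchesAlt d1 d2 := by
  unfold domainLevelMatches levelMatchesAlt
  simp only []
  by_cases h : (pySplitDot d1).reverse.length > (pySplitDot d2).reverse.length
  · rw [if_pos h, dlm_eq _ _ 0 (by omega) (by omega)]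
    simp [lmAlt_comm]
  · rw [if_neg h, dlm_eq _ _ 0 (by omega) (by omega)]
    simp

-- B's scan as a pure fold over (best, best_match) states
def bStep (target : String) (st : Option String × Int) (d : String) : Option String × Int :=
  let dl := PySem.Str.lower d
  let m := levelMatchesAlt target dl
  if m ≥ st.2 then (some dl, m) else st

theorem bLoop_no_exact (target : String) (l : List String)
    (h : ∀ d ∈ l, PySem.Str.lower d ≠ target) (best : Option String) (bm : Int) :
    bLoop target l best bm = (l.foldl (bStep target) (best, bm)).1 := by
  induction l generalizing best bm with
  | nil => simp [bLoop]
  | cons d rest ih =>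
    have hd : PySem.Str.lower d ≠ target := h d (by simp)
    have ht : ∀ x ∈ rest, PySem.Str.lower x ≠ target := fun x hx => h x (by simp [hx])
    rw [bLoop, List.foldl_cons]
    simp only [bStep]
    rw [if_neg hd]
    split <;> exact ih ht _ _

theorem bLoop_exact (target : String) (l : List String)
    (h : ∃ d ∈ l, PySem.Str.lower d = target) (best : Option String) (bm : Int) :
    bLoop target l best bm = some target := by
  induction l generalizing best bm with
  | nil => simp at h
  | cons d rest ih =>
    rw [bLoop]
    by_cases hd : PySem.Str.lower d = target
    · simp [hd]
    · rw [if_neg hd]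
      have : ∃ x ∈ rest, PySem.Str.lower x = target := by
        rcases h with ⟨x, hx, hxe⟩
        rcases List.mem_cons.mp hx with h1 | h1
        · exact absurd (h1 ▸ hxe) hd
        · exact ⟨x, h1, hxe⟩
      simp only [ge_iff_le]
      split <;> exact ih this _ _

theorem findExact_none (l : List String) (domain : String)
    (h : ∀ d ∈ l, PySem.Str.lower d ≠ PySem.Str.lower domain) :
    findExactLoop l domain = none := by
  induction l with
  | nil => rfl
  | cons d rest ih =>
    rw [findExactLoop]
    rw [if_neg (h d (by simp))]
    exact ih fun x hx => h x (by simp [hx])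

theorem findExact_exact (l : List String) (domain : String)
    (h : ∃ d ∈ l, PySem.Str.lower d = PySem.Str.lower domain) :
    findExactLoop l domain = some (PySem.Str.lower domain) := by
  induction l with
  | nil => simp at h
  | cons d rest ih =>
    rw [findExactLoop]
    by_cases hd : PySem.Str.lower d = PySem.Str.lower domain
    · rw [if_pos hd, hd]
    · rw [if_neg hd]
      apply ih
      rcases h with ⟨x, hx, hxe⟩
      rcases List.mem_cons.mp hx with h1 | h1
      · exact absurd (h1 ▸ hxe) hd
      · exact ⟨x, h1, hxe⟩

theorem sorted_append_singleton {α : Type} (l : List α) (x : α) (key : α → Int) :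
    PySem.List.sorted (l ++ [x]) key false =
      PySem.List.insertBy (fun a b => decide (key a < key b)) x (PySem.List.sorted l key false) := by
  rw [PySem.List.sorted_eq_foldl_insertBy, PySem.List.sorted_eq_foldl_insertBy, List.foldl_append]
  rfl

theorem getLast?_insertBy (x : String × Int) (ys : List (String × Int))
    (h : ys.Pairwise (fun a b => a.2 ≤ b.2)) :
    (PySem.List.insertBy (fun a b => decide (a.2 < b.2)) x ys).getLast? =
      (match ys.getLast? with
       | none => some x
       | some y => if x.2 < y.2 then some y else some x) := by
  induction ys with
  | nil => simp [PySem.List.insertBy]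
  | cons y ys ih =>
    rw [PySem.List.insertBy]
    by_cases hb : x.2 < y.2
    · simp only [hb, decide_true, if_pos]
      cases ys with
      | nil => simp [hb]
      | cons z zs =>
        rw [List.getLast?_cons_cons, List.getLast?_cons_cons]
        have hz : ∃ w, (z :: zs).getLast? = some w ∧ y.2 ≤ w.2 := by
          have hne : (z :: zs).getLast? = some ((z :: zs).getLast (by simp)) :=
            List.getLast?_eq_some_getLast (by simp)
          exact ⟨_, hne, (List.pairwise_cons.mp h).1 _ (List.mem_of_getLast? hne)⟩
        rcases hz with ⟨w, hw, hyw⟩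
        rw [hw]
        have : x.2 < w.2 := lt_of_lt_of_le hb hyw
        simp [this]
    · simp only [hb, decide_false, if_neg, Bool.false_eq_true, not_false_iff]
      have hpw : ys.Pairwise (fun a b => a.2 ≤ b.2) := (List.pairwise_cons.mp h).2
      cases ys with
      | nil =>
        simp [PySem.List.insertBy, hb]
      | cons z zs =>
        have hnn : PySem.List.insertBy (fun a b => decide (a.2 < b.2)) x (z :: zs) ≠ [] := by
          intro hc
          have : x ∈ PySem.List.insertBy (fun a b => decide (a.2 < b.2)) x (z :: zs) :=
            (PySem.List.mem_insertBy _ _ _ _).mpr (Or.inl rfl)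
          simp [hc] at this
        rcases List.exists_cons_of_ne_nil hnn with ⟨u, us, hu⟩
        rw [hu, List.getLast?_cons_cons, ← hu, ih hpw, List.getLast?_cons_cons]

-- the value list A sorts, written with B's match function
def mlist (target : String) (l : List String) : List (String × Int) :=
  l.map (fun d => (PySem.Str.lower d, levelMatchesAlt target (PySem.Str.lower d)))

theorem foldl_bStep_eq (target : String) (l : List String) :
    l.foldl (bStep target) (none, -1) =
      (match (PySem.List.sorted (mlist target l) (fun e => e.2) false).getLast? with
       | none => (none, (-1 : Int))
       | some y => (some y.1, y.2)) := by
  induction l using List.reverseRecOn with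
  | nil => simp [mlist, PySem.List.sorted]
  | append_singleton l d ih =>
    rw [List.foldl_append, List.foldl_cons, List.foldl_nil, ih]
    have hm : mlist target (l ++ [d]) =
        mlist target l ++ [(PySem.Str.lower d, levelMatchesAlt target (PySem.Str.lower d))] := by
      simp [mlist]
    rw [hm, sorted_append_singleton,
      getLast?_insertBy _ _ (PySem.List.sorted_pairwise (mlist target l) (fun e => e.2))]
    have hnn : 0 ≤ levelMatchesAlt target (PySem.Str.lower d) := lmAlt_nonneg _ _
    cases hgl : (PySem.List.sorted (mlist target l) (fun e => e.2) false).getLast? with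
    | none => simp [bStep, show levelMatchesAlt target (PySem.Str.lower d) ≥ (-1 : Int) by omega]
    | some y =>
      simp only [bStep]
      by_cases hge : levelMatchesAlt target (PySem.Str.lower d) ≥ y.2
      · rw [if_pos hge]
        simp [show ¬ (levelMatchesAlt target (PySem.Str.lower d) < y.2) by omega]
      · rw [if_neg hge]
        simp [show levelMatchesAlt target (PySem.Str.lower d) < y.2 by omega]

-- ===== VERDICT (by name: the statement is the Claim_ definition above) =====
theorem find_best_fqdn_py_spec : Claim_equal_find_best_fqdn_py := by
  intro domains domain _
  unfold Spec_find_best_fqdn_py find_best_fqdn_py find_best_fqdn_py_alt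
  by_cases hall : ∀ d ∈ domains, PySem.Str.lower d ≠ PySem.Str.lower domain
  · cases domains with
    | nil => simp [bLoop]
    | cons d0 rest =>
      rw [if_neg (by simp)]
      rw [findExact_none _ _ hall]
      rw [bLoop_no_exact _ _ hall, foldl_bStep_eq]
      simp only []
      have hmapeq : (d0 :: rest).map (fun d =>
          (PySem.Str.lower d, domainLevelMatches (PySem.Str.lower domain) (PySem.Str.lower d))) =
          mlist (PySem.Str.lower domain) (d0 :: rest) := by
        simp [mlist, helper_eq]
      rw [hmapeq, List.head?_reverse]
      have hne : PySem.List.sorted (mlist (PySem.Str.lower domain) (d0 :: rest)) (fun e => e.2) false ≠ [] := by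
        rw [Ne, PySem.List.sorted_eq_nil_iff]
        simp [mlist]
      rcases List.exists_cons_of_ne_nil hne with ⟨u, us, hu⟩
      rw [hu]
      cases hgl : (u :: us).getLast? with
      | none => simp at hgl
      | some y => simp
  · push Not at hall
    rcases hall with ⟨x, hx, hxe⟩
    have hnil : domains ≠ [] := by rintro rfl; simp at hx
    rw [if_neg (by simpa [List.length_eq_zero_iff] using hnil)]
    rw [findExact_exact _ _ ⟨x, hx, hxe⟩, bLoop_exact _ _ ⟨x, hx, hxe⟩]
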